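-- pv_equiv track=rewrite | github.com/Zambe-s/pro-green | genera_prodotti.py | trova_prezzo
-- ===== SOURCE A (Python) =====
-- listino_prezzi = {
--     # Robot
--     "Automower 305": "1.299,00 €",
--     "Automower 310 Mark II": "1.699,00 €",
--     "Automower 310": "1.699,00 €", # Caso alternativo
--     "Automower 405X": "1.999,00 €",
--     "Automower 415X": "2.499,00 €",
--
--     # Prati
--     "Prato Sintetico Luxury 40mm": "24,90 € / mq",
--     "Prato Sintetico Luxury": "24,90 € / mq",
--     "Prato Sintetico Comfort 35mm": "19,50 € / mq",
--     "Prato Sintetico Comfort": "19,50 € / mq",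
--     "Prato Sintetico Basic 20mm": "12,00 € / mq",
--     "Prato Sintetico Basic": "12,00 € / mq",
--     "Prato Sintetico Pet Friendly": "22,00 € / mq",
--
--     # Concimi
--     "Concime Primavera Verde": "32,00 €",
--     "Concime Autunnale Slow": "38,00 €",
--     "Concime Antimuschio Plus": "29,00 €",
--     "Concime Antimuschio": "29,00 €",
--     "Ferro Liquido Professionale": "15,00 €",
--     "Ferro Liquido": "15,00 €",
--
--     # Semi
--     "Mix Prato Inglese": "18,00 €",
--     "Semi Rigenera Rapido": "22,00 €",
--     "Mix Ombra e Sole": "20,00 €",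
--     "Sementi Rustico Forte": "17,50 €",
--
--     # Irrigazione
--     "Kit Ala Gocciolante": "45,00 €",
--     "Centralina Bluetooth": "65,00 €",
--     "Tubo Polietilene": "28,00 €",
--     "Irrigatore Pop up": "9,00 €"
-- }
--
-- def trova_prezzo(titolo_prodotto):
--     # 1. Cerca corrispondenza esatta
--     if titolo_prodotto in listino_prezzi:
--         return listino_prezzi[titolo_prodotto]
--
--     # 2. Cerca corrispondenza "morbida" (ignora maiuscole)
--     titolo_lower = titolo_prodotto.lower()
--     for key, val in listino_prezzi.items():
--         if key.lower() == titolo_lower: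
--             return val
--
--     # 3. Cerca se una parte del nome è contenuta
--     for key, val in listino_prezzi.items():
--         if key.lower() in titolo_lower or titolo_lower in key.lower():
--             return val
--
--     return "Su richiesta" # Se proprio non lo trova
-- ===== SOURCE B (Python) =====
-- listino_prezzi = {
--     # Robot
--     "Automower 305": "1.299,00 €",
--     "Automower 310 Mark II": "1.699,00 €",
--     "Automower 310": "1.699,00 €", # Caso alternativo
--     "Automower 405X": "1.999,00 €",
--     "Automower 415X": "2.499,00 €",
--
--     # Prati
--     "Prato Sintetico Luxury 40mm": "24,90 € / mq",
--     "Prato Sintetico Luxury": "24,90 € / mq",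
--     "Prato Sintetico Comfort 35mm": "19,50 € / mq",
--     "Prato Sintetico Comfort": "19,50 € / mq",
--     "Prato Sintetico Basic 20mm": "12,00 € / mq",
--     "Prato Sintetico Basic": "12,00 € / mq",
--     "Prato Sintetico Pet Friendly": "22,00 € / mq",
--
--     # Concimi
--     "Concime Primavera Verde": "32,00 €",
--     "Concime Autunnale Slow": "38,00 €",
--     "Concime Antimuschio Plus": "29,00 €",
--     "Concime Antimuschio": "29,00 €",
--     "Ferro Liquido Professionale": "15,00 €",
--     "Ferro Liquido": "15,00 €",
--
--     # Semi
--     "Mix Prato Inglese": "18,00 €",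
--     "Semi Rigenera Rapido": "22,00 €",
--     "Mix Ombra e Sole": "20,00 €",
--     "Sementi Rustico Forte": "17,50 €",
--
--     # Irrigazione
--     "Kit Ala Gocciolante": "45,00 €",
--     "Centralina Bluetooth": "65,00 €",
--     "Tubo Polietilene": "28,00 €",
--     "Irrigatore Pop up": "9,00 €"
-- }
--
-- def trova_prezzo(titolo_prodotto):
--     # Single pass over the price list: exact hit returns at once (keys are unique,
--     # so it equals the dict lookup); otherwise remember the first case-insensitive
--     # and the first substring hit, and pick by priority after the loop.
--     titolo_lower = titolo_prodotto.lower()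
--     ci_match = None
--     sub_match = None
--     for key, val in listino_prezzi.items():
--         if key == titolo_prodotto:
--             return val
--         key_lower = key.lower()
--         if ci_match is None and key_lower == titolo_lower:
--             ci_match = val
--         if sub_match is None and (key_lower in titolo_lower or titolo_lower in key_lower):
--             sub_match = val
--     if ci_match is not None:
--         return ci_match
--     if sub_match is not None:
--         return sub_match
--     return "Su richiesta"
-- ===== Notes on version B (the rewrite author's own statement) =====
-- stated objective: alternative
-- what changed: Replaces A's dict-membership check plus two full sequential scans (one per fallback tier) with a single pass over the items that returns on an exact hit and records the first case-insensitive and first substring hits in two accumulators, picking by priority after the loop.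
import Mathlib
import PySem

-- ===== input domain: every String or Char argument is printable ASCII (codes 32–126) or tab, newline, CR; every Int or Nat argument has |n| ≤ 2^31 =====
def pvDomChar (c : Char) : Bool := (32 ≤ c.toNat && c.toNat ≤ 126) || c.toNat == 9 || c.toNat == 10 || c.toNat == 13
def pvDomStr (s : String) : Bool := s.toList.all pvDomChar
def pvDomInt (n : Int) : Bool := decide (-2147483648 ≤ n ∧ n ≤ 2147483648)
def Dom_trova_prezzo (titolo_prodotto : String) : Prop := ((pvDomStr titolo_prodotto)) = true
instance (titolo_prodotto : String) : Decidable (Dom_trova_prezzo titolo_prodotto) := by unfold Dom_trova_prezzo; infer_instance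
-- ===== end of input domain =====

-- B fuses A's dict lookup and two fallback scans into one pass with two accumulators (same cost, different decomposition).

-- the module-level dict listino_prezzi, as an insertion-ordered association list (all keys distinct)
def listino : List (String × String) :=
  [("Automower 305", "1.299,00 €"),
   ("Automower 310 Mark II", "1.699,00 €"),
   ("Automower 310", "1.699,00 €"),
   ("Automower 405X", "1.999,00 €"),
   ("Automower 415X", "2.499,00 €"),
   ("Prato Sintetico Luxury 40mm", "24,90 € / mq"),
   ("Prato Sintetico Luxury", "24,90 € / mq"),
   ("Prato Sintetico Comfort 35mm", "19,50 € / mq"),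
   ("Prato Sintetico Comfort", "19,50 € / mq"),
   ("Prato Sintetico Basic 20mm", "12,00 € / mq"),
   ("Prato Sintetico Basic", "12,00 € / mq"),
   ("Prato Sintetico Pet Friendly", "22,00 € / mq"),
   ("Concime Primavera Verde", "32,00 €"),
   ("Concime Autunnale Slow", "38,00 €"),
   ("Concime Antimuschio Plus", "29,00 €"),
   ("Concime Antimuschio", "29,00 €"),
   ("Ferro Liquido Professionale", "15,00 €"),
   ("Ferro Liquido", "15,00 €"),
   ("Mix Prato Inglese", "18,00 €"),
   ("Semi Rigenera Rapido", "22,00 €"),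
   ("Mix Ombra e Sole", "20,00 €"),
   ("Sementi Rustico Forte", "17,50 €"),
   ("Kit Ala Gocciolante", "45,00 €"),
   ("Centralina Bluetooth", "65,00 €"),
   ("Tubo Polietilene", "28,00 €"),
   ("Irrigatore Pop up", "9,00 €")]

-- ===== PORT A =====
-- `titolo_prodotto in listino_prezzi` + `listino_prezzi[titolo_prodotto]`: first-match lookup in the assoc list
def lookupExact : List (String × String) → String → Option String
  | [], _ => none
  | (k, v) :: rest, t => if k = t then some v else lookupExact rest t

-- loop 2: first case-insensitive match
def loopCI : List (String × String) → String → Option String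
  | [], _ => none
  | (k, v) :: rest, tl => if PySem.Str.lower k = tl then some v else loopCI rest tl

-- loop 3: first substring match (either direction)
def loopSub : List (String × String) → String → Option String
  | [], _ => none
  | (k, v) :: rest, tl =>
      if PySem.Str.isIn (PySem.Str.lower k) tl || PySem.Str.isIn tl (PySem.Str.lower k) then some v
      else loopSub rest tl

def trova_prezzo (titolo_prodotto : String) : String :=
  match lookupExact listino titolo_prodotto with
  | some v => v
  | none =>
    let titolo_lower := PySem.Str.lower titolo_prodotto
    match loopCI listino titolo_lower with
    | some v => v
    | none =>
      match loopSub listino titolo_lower with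
      | some v => v
      | none => "Su richiesta"

-- ===== PORT B =====
-- single pass: return on exact hit, else remember first CI hit and first substring hit
def loopB : List (String × String) → String → String → Option String → Option String → String
  | [], _, _, ci, sub =>
      match ci with
      | some v => v
      | none =>
        match sub with
        | some v => v
        | none => "Su richiesta"
  | (k, v) :: rest, t, tl, ci, sub =>
      if k = t then v
      else
        let kl := PySem.Str.lower k
        let ci' := if ci = none ∧ kl = tl then some v else ci
        let sub' := if sub = none ∧ (PySem.Str.isIn kl tl || PySem.Str.isIn tl kl) then some v else sub
        loopB rest t tl ci' sub'

def trova_prezzo_alt (titolo_prodotto : String) : String :=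
  loopB listino titolo_prodotto (PySem.Str.lower titolo_prodotto) none none

-- ===== PRECONDITION & SPEC =====
def Spec_trova_prezzo (titolo_prodotto : String) (out : String) : Prop := out = trova_prezzo_alt titolo_prodotto
instance (titolo_prodotto : String) (out : String) : Decidable (Spec_trova_prezzo titolo_prodotto out) := by unfold Spec_trova_prezzo; infer_instance

-- ===== CLAIM (what is proved, stated in full; the proofs are below) =====
def Claim_equal_trova_prezzo : Prop := ∀ (titolo_prodotto : String), Dom_trova_prezzo titolo_prodotto → Spec_trova_prezzo titolo_prodotto (trova_prezzo titolo_prodotto)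

-- ===== LEMMAS AND PROOFS =====

-- loop invariant: B's fused pass computes A's three-tier result, for any list and accumulators
theorem loopB_eq (l : List (String × String)) (t tl : String) (ci sub : Option String) :
    loopB l t tl ci sub =
      match lookupExact l t with
      | some v => v
      | none =>
        match (match ci with | some a => some a | none => loopCI l tl) with
        | some v => v
        | none =>
          match (match sub with | some a => some a | none => loopSub l tl) with
          | some v => v
          | none => "Su richiesta" := by
  induction l generalizing ci sub with
  | nil =>
      cases ci <;> cases sub <;> simp [loopB, lookupExact, loopCI, loopSub]
  | cons kv rest ih =>
      obtain ⟨k, v⟩ := kv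
      by_cases he : k = t
      · simp [loopB, lookupExact, he]
      · simp only [loopB, lookupExact, loopCI, loopSub, if_neg he]
        rw [ih]
        cases ci <;> cases sub <;>
          by_cases hc : PySem.Str.lower k = tl <;>
          by_cases hs : (PySem.Str.isIn (PySem.Str.lower k) tl || PySem.Str.isIn tl (PySem.Str.lower k)) = true <;>
          simp [hc, hs] <;> split_ifs <;> simp_all

-- ===== VERDICT (by name: the statement is the Claim_ definition above) =====
theorem trova_prezzo_spec : Claim_equal_trova_prezzo := by
  intro t _
  show trova_prezzo t = trova_prezzo_alt t
  rw [trova_prezzo_alt, loopB_eq, trova_prezzo]
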